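-- pv_equiv track=rewrite | github.com/XeroXer/advent_of_code_2016 | xeroxer-python3/day02/part2.py | handle_directions
-- ===== SOURCE A (Python) =====
-- def handle_directions(directions):
--     """Handle input directions"""
--     keypad = {
--         -2: {0: '1'},
--         -1: {-1: '2', 0: '3', 1: '4'},
--         0: {-2: '5', -1: '6', 0: '7', 1: '8', 2: '9'},
--         1: {-1: 'A', 0: 'B', 1: 'C'},
--         2: {0: 'D'},
--     }
--     xpos = ypos = 0
--     passphrase = ''
--     for line in directions:
--         for direction in line:
--             if direction == 'L':
--                 xposn = xpos - 1
--                 xpos = xposn if xposn in keypad[ypos] else xpos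
--             elif direction == 'R':
--                 xposn = xpos + 1
--                 xpos = xposn if xposn in keypad[ypos] else xpos
--             elif direction == 'U':
--                 yposn = ypos - 1
--                 ypos = yposn if yposn in keypad and xpos in keypad[yposn] else ypos
--             elif direction == 'D':
--                 yposn = ypos + 1
--                 ypos = yposn if yposn in keypad and xpos in keypad[yposn] else ypos
--         passphrase += keypad[ypos][xpos]
--     return passphrase
-- ===== SOURCE B (Python) =====
-- def handle_directions(directions):
--     """Handle input directions"""
--     moves = {
--         '1': {'D': '3'},
--         '2': {'R': '3', 'D': '6'},
--         '3': {'L': '2', 'R': '4', 'U': '1', 'D': '7'},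
--         '4': {'L': '3', 'D': '8'},
--         '5': {'R': '6'},
--         '6': {'L': '5', 'R': '7', 'U': '2', 'D': 'A'},
--         '7': {'L': '6', 'R': '8', 'U': '3', 'D': 'B'},
--         '8': {'L': '7', 'R': '9', 'U': '4', 'D': 'C'},
--         '9': {'L': '8'},
--         'A': {'R': 'B', 'U': '6'},
--         'B': {'L': 'A', 'R': 'C', 'U': '7', 'D': 'D'},
--         'C': {'L': 'B', 'U': '8'},
--         'D': {'U': 'B'},
--     }
--     key = '7'
--     out = []
--     for line in directions:
--         for ch in line:
--             key = moves[key].get(ch, key)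
--         out.append(key)
--     return ''.join(out)
-- ===== Notes on version B (the rewrite author's own statement) =====
-- stated objective: simpler
-- what changed: Replaces A's coordinate simulation (an (x,y) walk with a dict-of-dicts keypad used as a per-move validity table) by a finite-state automaton directly on the 13 key characters: a precomputed transition table key x direction -> key, so there are no coordinates, no validity test and no final position-to-key lookup.
import Mathlib
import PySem

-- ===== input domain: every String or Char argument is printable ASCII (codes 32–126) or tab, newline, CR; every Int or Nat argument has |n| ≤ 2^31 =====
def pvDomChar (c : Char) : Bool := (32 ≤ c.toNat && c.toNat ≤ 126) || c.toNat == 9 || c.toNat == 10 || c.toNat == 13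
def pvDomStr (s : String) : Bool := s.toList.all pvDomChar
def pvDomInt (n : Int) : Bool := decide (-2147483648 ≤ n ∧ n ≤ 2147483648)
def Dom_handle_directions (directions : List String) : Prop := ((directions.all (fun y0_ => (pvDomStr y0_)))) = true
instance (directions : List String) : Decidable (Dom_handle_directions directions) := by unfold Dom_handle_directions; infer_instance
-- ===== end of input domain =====

-- B replaces A's coordinate walk over a dict-of-dicts keypad by a finite-state automaton on the
-- 13 key characters themselves: a precomputed transition table key × direction → key, with no
-- coordinates or validity test at all (objective: simpler). Both ports carry the Python str
-- passphrase as List Char and pack it with String.ofList once (Lean's String ++ is kernel-opaque).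

-- ===== PORT A =====
def keypadA : PySem.Dict Int (PySem.Dict Int String) :=
  PySem.Dict.ofList
    [ (-2, PySem.Dict.ofList [(0, "1")])
    , (-1, PySem.Dict.ofList [(-1, "2"), (0, "3"), (1, "4")])
    , (0,  PySem.Dict.ofList [(-2, "5"), (-1, "6"), (0, "7"), (1, "8"), (2, "9")])
    , (1,  PySem.Dict.ofList [(-1, "A"), (0, "B"), (1, "C")])
    , (2,  PySem.Dict.ofList [(0, "D")]) ]

-- one inner-loop step of A (direction handling); keypad[ypos] never misses (ypos stays a key),
-- so getD with an empty-dict default is exact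
def stepA (x y : Int) (c : Char) : Int × Int :=
  if c = 'L' then
    let xposn := x - 1
    (if (keypadA.getD y PySem.Dict.empty).contains xposn then xposn else x, y)
  else if c = 'R' then
    let xposn := x + 1
    (if (keypadA.getD y PySem.Dict.empty).contains xposn then xposn else x, y)
  else if c = 'U' then
    let yposn := y - 1
    (x, if keypadA.contains yposn && (keypadA.getD yposn PySem.Dict.empty).contains x then yposn else y)
  else if c = 'D' then
    let yposn := y + 1
    (x, if keypadA.contains yposn && (keypadA.getD yposn PySem.Dict.empty).contains x then yposn else y)
  else (x, y)

def lineA (st : (Int × Int) × List Char) (line : String) : (Int × Int) × List Char :=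
  let p := line.toList.foldl (fun q c => stepA q.1 q.2 c) st.1
  (p, st.2 ++ ((keypadA.getD p.2 PySem.Dict.empty).getD p.1 "").toList)

def handle_directions (directions : List String) : String :=
  String.ofList (directions.foldl lineA ((0, 0), [])).2

-- ===== PORT B =====
def movesB : PySem.Dict Char (PySem.Dict Char Char) :=
  PySem.Dict.ofList
    [ ('1', PySem.Dict.ofList [('D', '3')])
    , ('2', PySem.Dict.ofList [('R', '3'), ('D', '6')])
    , ('3', PySem.Dict.ofList [('L', '2'), ('R', '4'), ('U', '1'), ('D', '7')])
    , ('4', PySem.Dict.ofList [('L', '3'), ('D', '8')])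
    , ('5', PySem.Dict.ofList [('R', '6')])
    , ('6', PySem.Dict.ofList [('L', '5'), ('R', '7'), ('U', '2'), ('D', 'A')])
    , ('7', PySem.Dict.ofList [('L', '6'), ('R', '8'), ('U', '3'), ('D', 'B')])
    , ('8', PySem.Dict.ofList [('L', '7'), ('R', '9'), ('U', '4'), ('D', 'C')])
    , ('9', PySem.Dict.ofList [('L', '8')])
    , ('A', PySem.Dict.ofList [('R', 'B'), ('U', '6')])
    , ('B', PySem.Dict.ofList [('L', 'A'), ('R', 'C'), ('U', '7'), ('D', 'D')])
    , ('C', PySem.Dict.ofList [('L', 'B'), ('U', '8')])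
    , ('D', PySem.Dict.ofList [('U', 'B')]) ]

-- moves[key] never misses (key stays one of the 13 keypad keys), so getD with empty is exact
def stepB (key : Char) (c : Char) : Char :=
  (movesB.getD key PySem.Dict.empty).getD c key

def lineB (st : Char × List Char) (line : String) : Char × List Char :=
  let k := line.toList.foldl stepB st.1
  (k, st.2 ++ [k])

def handle_directions_alt (directions : List String) : String :=
  String.ofList (directions.foldl lineB ('7', [])).2

-- ===== PRECONDITION & SPEC =====
def Spec_handle_directions (directions : List String) (out : String) : Prop := out = handle_directions_alt directions
instance (directions : List String) (out : String) : Decidable (Spec_handle_directions directions out) := by unfold Spec_handle_directions; infer_instance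

-- ===== CLAIM (what is proved, stated in full; the proofs are below) =====
def Claim_equal_handle_directions : Prop := ∀ (directions : List String), Dom_handle_directions directions → Spec_handle_directions directions (handle_directions directions)

-- ===== LEMMAS AND PROOFS =====

-- the walk never leaves the keypad diamond
def ValidPos (p : Int × Int) : Prop := p.1.natAbs + p.2.natAbs ≤ 2

-- the key under A's position (the simulation relation between A's state and B's state)
def keyOf (p : Int × Int) : Char :=
  ((keypadA.getD p.2 PySem.Dict.empty).getD p.1 " ").toList.headD ' '

-- for a non-direction character both programs leave their state unchanged: every inner
-- dict of movesB has keys only among {'L','R','U','D'}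
theorem stepB_other (k c : Char) (hL : ¬ c = 'L') (hR : ¬ c = 'R')
    (hU : ¬ c = 'U') (hD : ¬ c = 'D') : stepB k c = k := by
  unfold stepB
  rcases hmk : movesB.get? k with _ | d
  · rw [movesB.getD_of_get?_eq_none _ hmk, PySem.Dict.getD_empty]
  · rw [movesB.getD_of_get?_eq_some _ hmk]
    have hmem := PySem.Dict.mem_items_of_get?_eq_some movesB hmk
    have hitems : movesB.items =
      [ ('1', PySem.Dict.mk [('D', '3')])
      , ('2', PySem.Dict.mk [('R', '3'), ('D', '6')])
      , ('3', PySem.Dict.mk [('L', '2'), ('R', '4'), ('U', '1'), ('D', '7')])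
      , ('4', PySem.Dict.mk [('L', '3'), ('D', '8')])
      , ('5', PySem.Dict.mk [('R', '6')])
      , ('6', PySem.Dict.mk [('L', '5'), ('R', '7'), ('U', '2'), ('D', 'A')])
      , ('7', PySem.Dict.mk [('L', '6'), ('R', '8'), ('U', '3'), ('D', 'B')])
      , ('8', PySem.Dict.mk [('L', '7'), ('R', '9'), ('U', '4'), ('D', 'C')])
      , ('9', PySem.Dict.mk [('L', '8')])
      , ('A', PySem.Dict.mk [('R', 'B'), ('U', '6')])
      , ('B', PySem.Dict.mk [('L', 'A'), ('R', 'C'), ('U', '7'), ('D', 'D')])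
      , ('C', PySem.Dict.mk [('L', 'B'), ('U', '8')])
      , ('D', PySem.Dict.mk [('U', 'B')]) ] := by decide
    rw [hitems] at hmem
    simp only [List.mem_cons, List.not_mem_nil, or_false, Prod.mk.injEq] at hmem
    rcases hmem with ⟨-, rfl⟩ | ⟨-, rfl⟩ | ⟨-, rfl⟩ | ⟨-, rfl⟩ | ⟨-, rfl⟩ | ⟨-, rfl⟩ |
      ⟨-, rfl⟩ | ⟨-, rfl⟩ | ⟨-, rfl⟩ | ⟨-, rfl⟩ | ⟨-, rfl⟩ | ⟨-, rfl⟩ | ⟨-, rfl⟩ <;>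
      (apply PySem.Dict.getD_of_not_contains _ _;
       simp [beq_eq_false_iff_ne, Ne.symm hL, Ne.symm hR, Ne.symm hU, Ne.symm hD])

theorem step_agree (x y : Int) (c : Char) (h : ValidPos (x, y)) :
    ValidPos (stepA x y c) ∧ keyOf (stepA x y c) = stepB (keyOf (x, y)) c := by
  have hx1 : -2 ≤ x := by unfold ValidPos at h; omega
  have hx2 : x ≤ 2 := by unfold ValidPos at h; omega
  have hy1 : -2 ≤ y := by unfold ValidPos at h; omega
  have hy2 : y ≤ 2 := by unfold ValidPos at h; omega
  by_cases hL : c = 'L'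
  · subst hL; interval_cases x <;> interval_cases y <;> revert h <;>
      unfold ValidPos stepA stepB keyOf <;> decide
  by_cases hR : c = 'R'
  · subst hR; interval_cases x <;> interval_cases y <;> revert h <;>
      unfold ValidPos stepA stepB keyOf <;> decide
  by_cases hU : c = 'U'
  · subst hU; interval_cases x <;> interval_cases y <;> revert h <;>
      unfold ValidPos stepA stepB keyOf <;> decide
  by_cases hD : c = 'D'
  · subst hD; interval_cases x <;> interval_cases y <;> revert h <;>
      unfold ValidPos stepA stepB keyOf <;> decide
  · have hA : stepA x y c = (x, y) := by simp [stepA, hL, hR, hU, hD]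
    rw [hA]
    exact ⟨h, (stepB_other (keyOf (x, y)) c hL hR hU hD).symm⟩

theorem fold_step_agree (cs : List Char) (p : Int × Int) (h : ValidPos p) :
    ValidPos (cs.foldl (fun q c => stepA q.1 q.2 c) p) ∧
    keyOf (cs.foldl (fun q c => stepA q.1 q.2 c) p) = cs.foldl stepB (keyOf p) := by
  induction cs generalizing p with
  | nil => exact ⟨h, rfl⟩
  | cons c cs ih =>
    obtain ⟨hv, he⟩ := step_agree p.1 p.2 c h
    obtain ⟨hv', he'⟩ := ih _ hv
    exact ⟨hv', by simp only [List.foldl_cons, he', he]⟩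

theorem char_agree (p : Int × Int) (h : ValidPos p) :
    ((keypadA.getD p.2 PySem.Dict.empty).getD p.1 "").toList = [keyOf p] := by
  obtain ⟨x, y⟩ := p
  have hx1 : -2 ≤ x := by unfold ValidPos at h; omega
  have hx2 : x ≤ 2 := by unfold ValidPos at h; omega
  have hy1 : -2 ≤ y := by unfold ValidPos at h; omega
  have hy2 : y ≤ 2 := by unfold ValidPos at h; omega
  interval_cases x <;> interval_cases y <;> revert h <;> unfold ValidPos keyOf <;> decide

theorem fold_line_agree (lines : List String) (p : Int × Int) (acc : List Char)
    (h : ValidPos p) :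
    (lines.foldl lineA (p, acc)).2 = (lines.foldl lineB (keyOf p, acc)).2 := by
  induction lines generalizing p acc with
  | nil => rfl
  | cons l ls ih =>
    obtain ⟨hv, he⟩ := fold_step_agree l.toList p h
    simp only [List.foldl_cons, lineA, lineB, ← he, char_agree _ hv]
    exact ih _ _ hv

-- ===== VERDICT (by name: the statement is the Claim_ definition above) =====
theorem handle_directions_spec : Claim_equal_handle_directions := by
  intro directions _
  unfold Spec_handle_directions handle_directions handle_directions_alt
  have h := fold_line_agree directions (0, 0) [] (by unfold ValidPos; decide)
  rw [show keyOf (0, 0) = '7' from by decide] at h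
  rw [h]
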